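-- pv_equiv track=rewrite | github.com/UWPCE-PythonCert-ClassRepos/Self_Paced-Online | students/KennanY/Lesson2/GridPrint.py | buildFlexFullRow
-- ===== SOURCE A (Python) =====
-- def buildFlexFullRow(rowcol,size):
--   fullrow=''
--   #Form full row
--   for col in range (1,rowcol+1):
--     fullrow=fullrow + '+'
--     for psize in range(1,size+1):
--       fullrow=fullrow + '-'
--   fullrow=fullrow + '+' #Last +
--   return fullrow
-- ===== SOURCE B (Python) =====
-- def buildFlexFullRow(rowcol, size):
--     if rowcol <= 0:
--         return '+'
--     return '+' + ('-' * size + '+') * rowcol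
-- ===== Notes on version B (the rewrite author's own statement) =====
-- stated objective: faster
-- what changed: Replaces the nested character-append loops with a single closed-form string expression: repeat the unit '+' + '-'*size rowcol times and append the final '+'.
import Mathlib
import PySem

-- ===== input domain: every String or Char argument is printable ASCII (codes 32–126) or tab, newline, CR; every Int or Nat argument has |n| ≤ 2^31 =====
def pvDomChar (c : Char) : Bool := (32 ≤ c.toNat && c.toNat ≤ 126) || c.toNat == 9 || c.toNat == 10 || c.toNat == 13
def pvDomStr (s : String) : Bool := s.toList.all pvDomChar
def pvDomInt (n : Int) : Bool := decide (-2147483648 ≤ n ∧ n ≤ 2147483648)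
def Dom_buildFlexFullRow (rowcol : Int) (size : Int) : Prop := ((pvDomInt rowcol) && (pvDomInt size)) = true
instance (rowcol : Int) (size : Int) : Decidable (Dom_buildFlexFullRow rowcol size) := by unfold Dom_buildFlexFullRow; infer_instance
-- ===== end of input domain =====

-- B replaces A's nested character-append loops with one closed-form expression ('+' + '-'*size) * rowcol + '+'.

-- ===== PORT A =====
-- strings are ported as List Char (PySem convention) and packed with String.mk at the end
def buildFlexFullRow (rowcol : Int) (size : Int) : String :=
  let fullrow : List Char := []
  -- for col in range(1, rowcol+1): fullrow += '+'; for psize in range(1, size+1): fullrow += '-'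
  let fullrow := (PySem.List.pyRange 1 (rowcol + 1) 1).foldl
    (fun fr _col =>
      let fr := fr ++ ['+']
      (PySem.List.pyRange 1 (size + 1) 1).foldl (fun fr2 _psize => fr2 ++ ['-']) fr)
    fullrow
  String.mk (fullrow ++ ['+'])

-- ===== PORT B =====
-- if rowcol <= 0: return '+'  (avoids building the '-'*size unit when it is repeated 0 times)
-- return '+' + ('-' * size + '+') * rowcol
def buildFlexFullRow_alt (rowcol : Int) (size : Int) : String :=
  if rowcol ≤ 0 then String.mk ['+']
  else String.mk ('+' :: PySem.List.pyRepeat (PySem.List.pyRepeat ['-'] size ++ ['+']) rowcol)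

-- ===== PRECONDITION & SPEC =====
def Spec_buildFlexFullRow (rowcol : Int) (size : Int) (out : String) : Prop := out = buildFlexFullRow_alt rowcol size
instance (rowcol : Int) (size : Int) (out : String) : Decidable (Spec_buildFlexFullRow rowcol size out) := by unfold Spec_buildFlexFullRow; infer_instance

-- ===== CLAIM (what is proved, stated in full; the proofs are below) =====
def Claim_equal_buildFlexFullRow : Prop := ∀ (rowcol : Int) (size : Int), Dom_buildFlexFullRow rowcol size → Spec_buildFlexFullRow rowcol size (buildFlexFullRow rowcol size)

-- ===== LEMMAS AND PROOFS =====

-- the inner loop appends size.toNat dashes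
theorem inner_loop_eq (size : Int) (fr : List Char) :
    (PySem.List.pyRange 1 (size + 1) 1).foldl (fun fr2 _ => fr2 ++ ['-']) fr
      = fr ++ List.replicate size.toNat '-' := by
  rw [PySem.List.pyRange_one]
  have h : (size + 1 - 1).toNat = size.toNat := by omega
  rw [h]
  induction size.toNat generalizing fr with
  | zero => simp
  | succ n ih =>
    rw [List.range_succ]
    simp only [List.map_append, List.foldl_append, ih]
    simp [List.replicate_succ']

-- a foldl that ignores the list elements and appends a fixed block each step
theorem outer_loop_eq (rowcol : Int) (u : List Char) (fr : List Char) :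
    (PySem.List.pyRange 1 (rowcol + 1) 1).foldl (fun f _ => f ++ u) fr
      = fr ++ (List.replicate rowcol.toNat u).flatten := by
  rw [PySem.List.pyRange_one]
  have h : (rowcol + 1 - 1).toNat = rowcol.toNat := by omega
  rw [h]
  induction rowcol.toNat generalizing fr with
  | zero => simp
  | succ n ih =>
    rw [List.range_succ]
    simp only [List.map_append, List.foldl_append, ih]
    simp [List.replicate_succ']

-- ===== VERDICT (by name: the statement is the Claim_ definition above) =====
-- rotating the final '+' into the repeated unit
theorem rot_plus (n : Nat) (d : List Char) :
    (List.replicate n ('+' :: d)).flatten ++ ['+']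
      = '+' :: (List.replicate n (d ++ ['+'])).flatten := by
  induction n with
  | zero => simp
  | succ k ih => simp [List.replicate_succ, ih]

theorem buildFlexFullRow_spec : Claim_equal_buildFlexFullRow := by
  intro rowcol size _
  show buildFlexFullRow rowcol size = buildFlexFullRow_alt rowcol size
  unfold buildFlexFullRow buildFlexFullRow_alt
  have hf : (fun (fr : List Char) (_ : Int) =>
      (PySem.List.pyRange 1 (size + 1) 1).foldl (fun fr2 _ => fr2 ++ ['-']) (fr ++ ['+']))
      = fun fr _ => fr ++ ('+' :: List.replicate size.toNat '-') := by
    funext fr c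
    rw [inner_loop_eq]
    simp
  simp only []
  rw [hf, outer_loop_eq]
  by_cases hr : rowcol ≤ 0
  · have : rowcol.toNat = 0 := by omega
    simp [hr, this]
  · simp only [hr, if_false]
    simp [PySem.List.pyRepeat, rot_plus]
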